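-- pv_equiv track=rewrite | github.com/park-hg/swjungle-algorithm-study | Programmers-신고결과받기/park-hg.py | solution
-- ===== SOURCE A (Python) =====
-- from collections import defaultdict
--
-- def solution(id_list, report, k):
--     report = set(report)
--     d = defaultdict(set)
--     counter = defaultdict(int)
--     for r in report:
--         user, reported = r.split()
--         d[user].add(reported)
--         counter[reported] += 1
--
--     answer = []
--     for id in id_list:
--         cnt = 0
--         for r in d[id]:
--             if counter[r] >= k:
--                 cnt += 1
--         answer.append(cnt)
--
--     return answer
-- ===== SOURCE B (Python) =====
-- def solution(id_list, report, k):
--     pairs = []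
--     for r in set(report):
--         user, reported = r.split()
--         pairs.append((user, reported))
--     counter = {}
--     for _, reported in pairs:
--         counter[reported] = counter.get(reported, 0) + 1
--     banned = {u for u, c in counter.items() if c >= k}
--     result = {}
--     for user, reported in set(pairs):
--         if reported in banned:
--             result[user] = result.get(user, 0) + 1
--     return [result.get(i, 0) for i in id_list]
-- ===== Notes on version B (the rewrite author's own statement) =====
-- stated objective: alternative
-- what changed: Replaces A's per-user dict-of-sets plus a nested scan of each id's reported-set with a flat decomposition: split the deduped reports into pairs once, count reports per target, derive a banned set, accumulate per-reporter counts in one pass over the deduped pairs, and read the answer off a dict.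
import Mathlib
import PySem

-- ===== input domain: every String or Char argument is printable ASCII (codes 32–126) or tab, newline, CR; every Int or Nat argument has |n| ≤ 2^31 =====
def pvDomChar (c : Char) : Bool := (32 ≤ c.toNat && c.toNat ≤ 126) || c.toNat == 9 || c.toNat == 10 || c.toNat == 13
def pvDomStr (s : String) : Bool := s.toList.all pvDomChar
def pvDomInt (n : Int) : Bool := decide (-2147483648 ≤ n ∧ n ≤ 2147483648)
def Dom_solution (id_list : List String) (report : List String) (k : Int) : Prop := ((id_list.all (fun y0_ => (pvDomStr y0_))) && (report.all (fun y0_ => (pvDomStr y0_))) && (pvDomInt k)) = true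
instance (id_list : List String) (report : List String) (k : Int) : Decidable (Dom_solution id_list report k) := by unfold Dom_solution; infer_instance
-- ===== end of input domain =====

-- B replaces A's per-user dict-of-sets and nested per-id scan with a flat count → banned-set → single accumulation pass (alternative decomposition, same asymptotic cost).


-- ===== PORT A =====
def solution (id_list : List String) (report : List String) (k : Int) : List Int :=
  -- report = set(report); build d (user -> set of reported) and counter in one pass
  let rep : PySem.Set String := PySem.Set.ofList report
  let st :=
    rep.foldl
      (fun (st : PySem.Dict String (PySem.Set String) × PySem.Dict String Int) r =>
        match PySem.Str.split₀ r with
        | [user, reported] =>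
            (st.1.insert user (PySem.Set.add (st.1.getD user []) reported),
             st.2.insert reported (st.2.getD reported 0 + 1))
        | _ => st)  -- unreachable under Pre_solution (Python raises ValueError on unpacking)
      (PySem.Dict.empty, PySem.Dict.empty)
  id_list.map (fun id =>
    (st.1.getD id []).foldl (fun cnt r => if st.2.getD r 0 ≥ k then cnt + 1 else cnt) 0)

-- ===== PORT B =====
def solution_alt (id_list : List String) (report : List String) (k : Int) : List Int :=
  let pairs :=
    (PySem.Set.ofList report).foldl
      (fun acc r =>
        let ws := PySem.Str.split₀ r
        if ws.length = 2 then acc ++ [(ws.getD 0 "", ws.getD 1 "")]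
        else acc)  -- `user, reported = r.split()`; the else is unreachable under Pre_solution (Python raises ValueError)
      []
  let counter :=
    pairs.foldl
      (fun (c : PySem.Dict String Int) p => c.insert p.2 (c.getD p.2 0 + 1))
      PySem.Dict.empty
  let banned : PySem.Set String :=
    PySem.Set.ofList ((counter.items.filter (fun p => p.2 ≥ k)).map (·.1))
  let result :=
    (PySem.Set.ofList pairs).foldl
      (fun (res : PySem.Dict String Int) p =>
        if p.2 ∈ banned then res.insert p.1 (res.getD p.1 0 + 1) else res)
      PySem.Dict.empty
  id_list.map (fun id => result.getD id 0)

-- ===== PRECONDITION & SPEC =====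
-- Pre_ excludes report strings that do not split into exactly two whitespace-separated words,
-- on which A raises ValueError while unpacking `user, reported = r.split()`.
def Pre_solution (id_list : List String) (report : List String) (k : Int) : Prop :=
  ∀ r ∈ report, (PySem.Str.split₀ r).length = 2
instance (id_list : List String) (report : List String) (k : Int) : Decidable (Pre_solution id_list report k) := by unfold Pre_solution; infer_instance
def pvWitness_solution : List String × List String × Int := (["muzi", "frodo", "apeach"], ["muzi frodo", "apeach muzi", "muzi frodo"], 1)
def Spec_solution (id_list : List String) (report : List String) (k : Int) (out : List Int) : Prop := out = solution_alt id_list report k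
instance (id_list : List String) (report : List String) (k : Int) (out : List Int) : Decidable (Spec_solution id_list report k out) := by unfold Spec_solution; infer_instance

-- ===== CLAIM (what is proved, stated in full; the proofs are below) =====
def Claim_equal_solution : Prop := ∀ (id_list : List String) (report : List String) (k : Int), Dom_solution id_list report k → Pre_solution id_list report k → Spec_solution id_list report k (solution id_list report k)

-- ===== LEMMAS AND PROOFS =====
-- proof-side helpers naming the pieces of the two folds
def pvToPair (r : String) : String × String :=
  match PySem.Str.split₀ r with
  | [u, v] => (u, v)
  | _ => ("", "")

def pvStepD (d : PySem.Dict String (PySem.Set String)) (p : String × String) :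
    PySem.Dict String (PySem.Set String) :=
  d.insert p.1 (PySem.Set.add (d.getD p.1 []) p.2)

def pvStepC (c : PySem.Dict String Int) (p : String × String) : PySem.Dict String Int :=
  c.insert p.2 (c.getD p.2 0 + 1)

lemma pvFoldA_eq (L : List String) :
    (∀ r ∈ L, (PySem.Str.split₀ r).length = 2) →
    ∀ (st : PySem.Dict String (PySem.Set String) × PySem.Dict String Int),
    L.foldl
      (fun (st : PySem.Dict String (PySem.Set String) × PySem.Dict String Int) r =>
        match PySem.Str.split₀ r with
        | [user, reported] =>
            (st.1.insert user (PySem.Set.add (st.1.getD user []) reported),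
             st.2.insert reported (st.2.getD reported 0 + 1))
        | _ => st) st
      = ((L.map pvToPair).foldl pvStepD st.1, (L.map pvToPair).foldl pvStepC st.2) := by
  induction L with
  | nil => intro h st; rfl
  | cons r L ih =>
    intro h st
    have h2 := h r (by simp)
    match hs : PySem.Str.split₀ r with
    | [] => simp [hs] at h2
    | [_] => simp [hs] at h2
    | _ :: _ :: _ :: _ => simp [hs] at h2
    | [u, v] =>
      simp only [List.foldl_cons, List.map_cons, hs]
      rw [ih (fun r hr => h r (List.mem_cons_of_mem _ hr)) _]
      simp [pvToPair, hs, pvStepD, pvStepC]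

lemma pvFoldB_eq (L : List String) :
    (∀ r ∈ L, (PySem.Str.split₀ r).length = 2) →
    ∀ (acc : List (String × String)),
    L.foldl
      (fun acc r =>
        let ws := PySem.Str.split₀ r
        if ws.length = 2 then acc ++ [(ws.getD 0 "", ws.getD 1 "")]
        else acc) acc
      = acc ++ L.map pvToPair := by
  induction L with
  | nil => intro h acc; simp
  | cons r L ih =>
    intro h acc
    have h2 := h r (by simp)
    match hs : PySem.Str.split₀ r with
    | [] => simp [hs] at h2
    | [_] => simp [hs] at h2
    | _ :: _ :: _ :: _ => simp [hs] at h2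
    | [u, v] =>
      simp only [List.foldl_cons, List.map_cons, hs]
      rw [ih (fun r hr => h r (List.mem_cons_of_mem _ hr)) _]
      simp [pvToPair, hs]

lemma pvCFold_get?_isSome (ps : List (String × String)) (v : String) :
    ∀ (c : PySem.Dict String Int), ((∃ u, (u, v) ∈ ps) ∨ (c.get? v).isSome) →
    ((ps.foldl pvStepC c).get? v).isSome := by
  induction ps with
  | nil =>
    intro c h
    simpa using h.resolve_left (by rintro ⟨u, hu⟩; simp at hu)
  | cons p ps ih =>
    intro c h
    simp only [List.foldl_cons]
    apply ih
    by_cases hv : v = p.2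
    · right
      subst hv
      simp [pvStepC, PySem.Dict.get?_insert_self]
    · rcases h with ⟨u, hu⟩ | hs
      · rcases List.mem_cons.mp hu with heq | hmem
        · exact absurd (congrArg Prod.snd heq) hv
        · exact Or.inl ⟨u, hmem⟩
      · right
        simpa [pvStepC, PySem.Dict.get?_insert, hv] using hs

lemma pvCFold_nodup_keys (ps : List (String × String)) :
    ∀ (c : PySem.Dict String Int), c.keys.Nodup → (ps.foldl pvStepC c).keys.Nodup := by
  induction ps with
  | nil => intro c h; simpa using h
  | cons p ps ih =>
    intro c h
    exact ih _ (PySem.Dict.nodup_keys_insert _ _ _ h)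

lemma pvDFold_getD_mem (ps : List (String × String)) (id v : String) :
    ∀ (d : PySem.Dict String (PySem.Set String)),
    (v ∈ (ps.foldl pvStepD d).getD id [] ↔ v ∈ d.getD id [] ∨ (id, v) ∈ ps) := by
  induction ps with
  | nil => intro d; simp
  | cons p ps ih =>
    intro d
    simp only [List.foldl_cons, ih, List.mem_cons]
    by_cases hid : id = p.1
    · subst hid
      simp [pvStepD, PySem.Set.mem_add, Prod.ext_iff]
      tauto
    · simp [pvStepD, PySem.Dict.getD_insert, hid, Prod.ext_iff]
      try tauto

lemma pvDFold_getD_nodup (ps : List (String × String)) :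
    ∀ (d : PySem.Dict String (PySem.Set String)),
    (∀ key, (d.getD key ([] : PySem.Set String)).Nodup) →
    ∀ id, ((ps.foldl pvStepD d).getD id []).Nodup := by
  induction ps with
  | nil => intro d h id; exact h id
  | cons p ps ih =>
    intro d h id
    apply ih
    intro key
    by_cases hk : key = p.1
    · simpa [pvStepD, PySem.Dict.getD_insert, hk] using PySem.Set.nodup_add _ _ (h p.1)
    · simpa [pvStepD, PySem.Dict.getD_insert, hk] using h key

lemma pvRFold_getD (banned : PySem.Set String) (qs : List (String × String)) (id : String) :
    ∀ (res : PySem.Dict String Int),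
    ((qs.foldl
        (fun (res : PySem.Dict String Int) p =>
          if p.2 ∈ banned then res.insert p.1 (res.getD p.1 0 + 1) else res) res).getD id 0)
      = res.getD id 0 + ((qs.countP (fun p => p.1 == id && decide (p.2 ∈ banned))) : Int) := by
  induction qs with
  | nil => intro res; simp
  | cons p ps ih =>
    intro res
    simp only [List.foldl_cons, ih, List.countP_cons]
    by_cases hb : p.2 ∈ banned
    · by_cases hi : id = p.1
      · simp [hb, hi]
        ring
      · simp [PySem.Dict.getD_insert, hb, hi, Ne.symm hi]
    · simp [hb]

lemma pvGet?_mem_items (c : PySem.Dict String Int) (v : String) (c0 : Int)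
    (h : c.get? v = some c0) : (v, c0) ∈ c.items := by
  unfold PySem.Dict.get? at h
  rcases Option.map_eq_some_iff.mp h with ⟨q, hf, hq⟩
  have hmem := List.mem_of_find?_eq_some hf
  have hkey : q.1 = v := by simpa using List.find?_some hf
  have : q = (v, c0) := by
    cases q
    simp_all
  rwa [this] at hmem

lemma pvBanned_mem (c : PySem.Dict String Int) (hnd : c.keys.Nodup) (v : String) (k : Int)
    (hs : (c.get? v).isSome) :
    (v ∈ PySem.Set.ofList ((c.items.filter (fun p => p.2 ≥ k)).map (·.1))) ↔ c.getD v 0 ≥ k := by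
  rcases Option.isSome_iff_exists.mp hs with ⟨c0, hc0⟩
  have hgetD : c.getD v 0 = c0 := by simp [PySem.Dict.getD, hc0]
  rw [PySem.Set.mem_ofList, hgetD]
  simp only [List.mem_map, List.mem_filter]
  constructor
  · rintro ⟨p, ⟨hmem, hge⟩, hfst⟩
    have : c.get? p.1 = some p.2 := PySem.Dict.get?_of_mem_items c (by cases p; exact hmem) hnd
    rw [hfst, hc0] at this
    rw [Option.some_inj.mp this]
    simpa using hge
  · intro hge
    exact ⟨(v, c0), ⟨pvGet?_mem_items c v c0 hc0, by simpa using hge⟩, rfl⟩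

lemma pvPerId (P : List (String × String)) (counter : PySem.Dict String Int)
    (banned : PySem.Set String) (k : Int) (id : String)
    (hc : counter = P.foldl pvStepC PySem.Dict.empty)
    (hb : banned = PySem.Set.ofList ((counter.items.filter (fun p => p.2 ≥ k)).map (·.1))) :
    ((P.foldl pvStepD PySem.Dict.empty).getD id []).foldl
        (fun cnt r => if counter.getD r 0 ≥ k then cnt + 1 else cnt) 0
      = ((PySem.Set.ofList P).foldl
          (fun (res : PySem.Dict String Int) p =>
            if p.2 ∈ banned then res.insert p.1 (res.getD p.1 0 + 1) else res)
          PySem.Dict.empty).getD id 0 := by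
  have hgood : (fun (cnt : Int) r => if counter.getD r 0 ≥ k then cnt + 1 else cnt)
      = (fun (cnt : Int) r => if (fun r => decide (counter.getD r 0 ≥ k)) r = true then cnt + 1 else cnt) := by
    funext cnt r
    by_cases h : counter.getD r 0 ≥ k <;> simp [h]
  rw [hgood, PySem.List.foldl_count_if, pvRFold_getD, PySem.Dict.getD_empty, zero_add, zero_add]
  -- replace banned-membership by the counter condition
  have hnd : counter.keys.Nodup := by
    rw [hc]; exact pvCFold_nodup_keys P PySem.Dict.empty PySem.Dict.nodup_keys_empty
  have hcongr : ∀ p ∈ (PySem.Set.ofList P : List (String × String)),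
      ((p.1 == id && decide (p.2 ∈ banned)) = true
        ↔ (p.1 == id && decide (counter.getD p.2 0 ≥ k)) = true) := by
    intro p hp
    have hpP : p ∈ P := (PySem.Set.mem_ofList P p).mp hp
    have hsome : (counter.get? p.2).isSome := by
      rw [hc]
      exact pvCFold_get?_isSome P p.2 PySem.Dict.empty (Or.inl ⟨p.1, hpP⟩)
    have := pvBanned_mem counter hnd p.2 k hsome
    rw [hb]
    simp [this]
  rw [List.countP_congr hcongr]
  -- push the fst-test into a filter and the snd-projection into a map
  have hfilter : (PySem.Set.ofList P : List (String × String)).countP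
        (fun p => p.1 == id && decide (counter.getD p.2 0 ≥ k))
      = (((PySem.Set.ofList P : List (String × String)).filter
            (fun p => p.1 == id)).map (·.2)).countP
          (fun r => decide (counter.getD r 0 ≥ k)) := by
    rw [List.countP_map, List.countP_filter]
    exact List.countP_congr (fun p _ => by simp [Bool.and_comm])
  rw [hfilter]
  -- the two nodup lists have the same members, hence are permutations
  have hSnodup : ((P.foldl pvStepD PySem.Dict.empty).getD id ([] : PySem.Set String)).Nodup :=
    pvDFold_getD_nodup P PySem.Dict.empty (fun key => by simp) id
  have hQnodup : ((PySem.Set.ofList P : List (String × String)).filter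
      (fun p => p.1 == id)).Nodup := (PySem.Set.nodup_ofList P).filter _
  have hTnodup : (((PySem.Set.ofList P : List (String × String)).filter
      (fun p => p.1 == id)).map (·.2)).Nodup := by
    apply List.Nodup.map_on _ hQnodup
    intro x hx y hy hxy
    have hx1 : x.1 = id := by simpa using (List.mem_filter.mp hx).2
    have hy1 : y.1 = id := by simpa using (List.mem_filter.mp hy).2
    exact Prod.ext (hx1.trans hy1.symm) hxy
  have hperm : ((P.foldl pvStepD PySem.Dict.empty).getD id ([] : PySem.Set String)).Perm
      (((PySem.Set.ofList P : List (String × String)).filter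
        (fun p => p.1 == id)).map (·.2)) := by
    rw [List.perm_ext_iff_of_nodup hSnodup hTnodup]
    intro v
    rw [pvDFold_getD_mem]
    simp only [PySem.Dict.getD_empty, List.not_mem_nil, false_or, List.mem_map,
      List.mem_filter, PySem.Set.mem_ofList]
    constructor
    · intro hm
      exact ⟨(id, v), ⟨hm, by simp⟩, rfl⟩
    · rintro ⟨p, ⟨hmem, hfst⟩, hsnd⟩
      have : p = (id, v) := Prod.ext (by simpa using hfst) hsnd
      rwa [this] at hmem
  rw [hperm.countP_eq]

-- the two per-id loop bodies agree, so the maps over id_list agree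


-- ===== VERDICT (by name: the statement is the Claim_ definition above) =====
theorem solution_spec : Claim_equal_solution := by
  intro id_list report k hdom hpre
  unfold Spec_solution
  show solution id_list report k = solution_alt id_list report k
  have hpre' : ∀ r ∈ (PySem.Set.ofList report : List String), (PySem.Str.split₀ r).length = 2 :=
    fun r hr => hpre r ((PySem.Set.mem_ofList report r).mp hr)
  simp only [solution, solution_alt]
  rw [pvFoldA_eq _ hpre' _, pvFoldB_eq _ hpre' _]
  simp only [List.nil_append]
  refine List.map_congr_left (fun id _ => ?_)
  exact pvPerId _ _ _ k id rfl rfl
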